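-- pv_equiv track=rewrite | github.com/inhahe/GPDA | gpda_scannerless.py | _strip_verbose
-- ===== SOURCE A (Python) =====
-- def _strip_verbose(pattern):
--     """Remove unescaped whitespace and ``# ... \\n`` comments from a
--     regex pattern (the `x` flag).  Inside ``[...]`` brackets nothing is
--     stripped — class contents are kept verbatim.  Escaped whitespace
--     (``\\ ``) and escaped ``\\#`` are preserved as literal matches."""
--     out = []
--     i = 0
--     in_class = False
--     while i < len(pattern):
--         c = pattern[i]
--         if c == '\\' and i + 1 < len(pattern):
--             # Preserve escaped char, including escaped whitespace/#
--             out.append(pattern[i])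
--             out.append(pattern[i + 1])
--             i += 2
--             continue
--         if in_class:
--             out.append(c)
--             if c == ']':
--                 in_class = False
--             i += 1
--             continue
--         if c == '[':
--             in_class = True
--             out.append(c)
--             i += 1
--             continue
--         if c in ' \t\r\n':
--             i += 1
--             continue
--         if c == '#':
--             # skip to end of line
--             while i < len(pattern) and pattern[i] != '\n':
--                 i += 1
--             continue
--         out.append(c)
--         i += 1
--     return ''.join(out)
-- ===== SOURCE B (Python) =====
-- def _class_end(pattern, i):
--     """Index just past the ']' closing the class whose '[' is at i-1
--     (escaped pairs are opaque); len(pattern) if the class is unterminated."""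
--     n = len(pattern)
--     while i < n:
--         if pattern[i] == '\\' and i + 1 < n:
--             i += 2
--         elif pattern[i] == ']':
--             return i + 1
--         else:
--             i += 1
--     return n
--
--
-- def _strip_verbose(pattern):
--     out = []
--     i = 0
--     n = len(pattern)
--     while i < n:
--         c = pattern[i]
--         if c == '\\' and i + 1 < n:
--             out.append(pattern[i:i + 2])
--             i += 2
--         elif c == '[':
--             j = _class_end(pattern, i + 1)
--             out.append(pattern[i:j])
--             i = j
--         elif c == '#':
--             # '#' itself is never '\n', so searching from i skips it too
--             j = pattern.find('\n', i)
--             i = n if j < 0 else j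
--         elif c in ' \t\r\n':
--             i += 1
--         else:
--             out.append(c)
--             i += 1
--     return ''.join(out)
-- ===== Notes on version B (the rewrite author's own statement) =====
-- stated objective: alternative
-- what changed: Replaces A's flat character-at-a-time state machine with an in_class boolean flag by a recursive-descent tokenizer: a dedicated helper consumes an entire [...] class in one step (copied as a slice), comments are skipped with a single str.find, and escapes/literals are handled token-wise, so no cross-iteration state flag exists.
import Mathlib
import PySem

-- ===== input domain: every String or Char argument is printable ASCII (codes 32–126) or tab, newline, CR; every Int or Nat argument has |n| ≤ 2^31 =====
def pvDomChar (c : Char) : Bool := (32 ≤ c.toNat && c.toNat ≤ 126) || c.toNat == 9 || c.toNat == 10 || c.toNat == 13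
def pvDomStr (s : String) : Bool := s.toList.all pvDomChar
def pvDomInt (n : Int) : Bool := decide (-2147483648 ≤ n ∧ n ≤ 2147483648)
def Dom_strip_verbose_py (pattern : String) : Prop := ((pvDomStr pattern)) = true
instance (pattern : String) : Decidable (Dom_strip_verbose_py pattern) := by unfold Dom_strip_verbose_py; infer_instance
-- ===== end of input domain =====

-- B replaces A's flat state-machine loop (index + in_class flag) by a recursive-descent
-- tokenizer with a dedicated class-consumer; alternative decomposition, same exact output.


-- ===== PORT A =====
-- A's inner `while i < len and pattern[i] != '\n': i += 1` comment skip; the '#' the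
-- loop starts on is never '\n', so it is applied to the characters after the '#'.
def skipCommentA : List Char → List Char
  | [] => []
  | c :: r => if c = '\n' then c :: r else skipCommentA r

theorem skipCommentA_len_le : ∀ l : List Char, (skipCommentA l).length ≤ l.length := by
  intro l
  induction l with
  | nil => simp [skipCommentA]
  | cons c r ih =>
    simp only [skipCommentA]
    split
    · simp
    · simp; omega

-- A's while loop over the index with the in_class flag, as structural recursion on the rest.
def stripA (inClass : Bool) : List Char → List Char
  | [] => []
  | '\\' :: d :: r => '\\' :: d :: stripA inClass r
  | c :: r =>
    if inClass then c :: stripA (decide (c ≠ ']')) r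
    else if c = '[' then c :: stripA true r
    else if c = ' ' ∨ c = '\t' ∨ c = '\r' ∨ c = '\n' then stripA inClass r
    else if c = '#' then stripA inClass (skipCommentA r)
    else c :: stripA inClass r
  termination_by l => l.length
  decreasing_by
    all_goals simp
    all_goals first
      | omega
      | exact Nat.lt_succ_of_le (skipCommentA_len_le r)
      | exact skipCommentA_len_le r

def strip_verbose_py (pattern : String) : String :=
  String.ofList (stripA false pattern.toList)

-- ===== PORT B =====
-- B's `_class_end`, as (the class's characters after '[', the rest after the class).
def classSpanB : List Char → List Char × List Char
  | [] => ([], [])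
  | '\\' :: d :: r => let p := classSpanB r; ('\\' :: d :: p.1, p.2)
  | ']' :: r => ([']'], r)
  | c :: r => let p := classSpanB r; (c :: p.1, p.2)

theorem classSpanB_len_le : ∀ l : List Char, (classSpanB l).2.length ≤ l.length := by
  intro l
  induction l using classSpanB.induct <;> simp_all [classSpanB] <;> omega

def stripB : List Char → List Char
  | [] => []
  | '\\' :: d :: r => '\\' :: d :: stripB r
  | '[' :: r => let p := classSpanB r; '[' :: (p.1 ++ stripB p.2)
  | '#' :: r => stripB (r.dropWhile (· ≠ '\n'))    -- pattern.find('\n', i); '#' ≠ '\n'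
  | c :: r =>
    if c = ' ' ∨ c = '\t' ∨ c = '\r' ∨ c = '\n' then stripB r
    else c :: stripB r
  termination_by l => l.length
  decreasing_by
    all_goals simp
    all_goals first
      | omega
      | exact Nat.lt_succ_of_le (classSpanB_len_le r)
      | exact classSpanB_len_le r
      | exact Nat.lt_succ_of_le (List.length_dropWhile_le _ _)
      | exact List.length_dropWhile_le _ _

def strip_verbose_py_alt (pattern : String) : String :=
  String.ofList (stripB pattern.toList)

-- ===== PRECONDITION & SPEC =====
def Spec_strip_verbose_py (pattern : String) (out : String) : Prop := out = strip_verbose_py_alt pattern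
instance (pattern : String) (out : String) : Decidable (Spec_strip_verbose_py pattern out) := by unfold Spec_strip_verbose_py; infer_instance

-- ===== CLAIM (what is proved, stated in full; the proofs are below) =====
def Claim_equal_strip_verbose_py : Prop := ∀ (pattern : String), Dom_strip_verbose_py pattern → Spec_strip_verbose_py pattern (strip_verbose_py pattern)

-- ===== LEMMAS AND PROOFS =====
theorem skipCommentA_eq_dropWhile :
    ∀ l : List Char, skipCommentA l = l.dropWhile (· ≠ '\n') := by
  intro l
  induction l with
  | nil => rfl
  | cons c r ih =>
    simp only [skipCommentA, List.dropWhile_cons]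
    by_cases h : c = '\n' <;> simp [h, ih]

-- per-shape unfolding lemmas for the overlapping literal-pattern matches
theorem A_nil (b : Bool) : stripA b [] = [] := by simp [stripA]

theorem A_esc (b : Bool) (d : Char) (r : List Char) :
    stripA b ('\\' :: d :: r) = '\\' :: d :: stripA b r := by simp [stripA]

theorem A_bs_nil (b : Bool) : stripA b ['\\'] = ['\\'] := by
  rw [stripA.eq_def]
  split
  · simp_all
  · simp_all
  · rename_i heq
    injection heq with h1 h2
    subst h1; subst h2
    cases b <;> simp [A_nil]

theorem A_cons (b : Bool) (c : Char) (r : List Char) (h : c ≠ '\\') :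
    stripA b (c :: r) =
      if b then c :: stripA (decide (c ≠ ']')) r
      else if c = '[' then c :: stripA true r
      else if c = ' ' ∨ c = '\t' ∨ c = '\r' ∨ c = '\n' then stripA b r
      else if c = '#' then stripA b (skipCommentA r)
      else c :: stripA b r := by
  rw [stripA.eq_def]; split <;> simp_all

theorem B_nil : stripB [] = [] := by simp [stripB]

theorem B_esc (d : Char) (r : List Char) :
    stripB ('\\' :: d :: r) = '\\' :: d :: stripB r := by simp [stripB]

theorem B_bs_nil : stripB ['\\'] = ['\\'] := by
  rw [stripB.eq_def]
  split
  · simp_all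
  · simp_all
  · simp_all
  · simp_all
  · rename_i heq
    injection heq with h1 h2
    subst h1; subst h2
    simp [B_nil]

theorem B_class (r : List Char) :
    stripB ('[' :: r) = '[' :: ((classSpanB r).1 ++ stripB (classSpanB r).2) := by
  simp [stripB]

theorem B_comment (r : List Char) :
    stripB ('#' :: r) = stripB (r.dropWhile (· ≠ '\n')) := by
  simp [stripB]

theorem B_cons (c : Char) (r : List Char) (h1 : c ≠ '\\') (h2 : c ≠ '[') (h3 : c ≠ '#') :
    stripB (c :: r) =
      if c = ' ' ∨ c = '\t' ∨ c = '\r' ∨ c = '\n' then stripB r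
      else c :: stripB r := by
  rw [stripB.eq_def]; split <;> simp_all

theorem S_nil : classSpanB [] = ([], []) := rfl

theorem S_esc (d : Char) (r : List Char) :
    classSpanB ('\\' :: d :: r) =
      ('\\' :: d :: (classSpanB r).1, (classSpanB r).2) := by simp [classSpanB]

theorem S_close (r : List Char) : classSpanB (']' :: r) = ([']'], r) := by
  simp [classSpanB]

theorem S_bs_nil : classSpanB ['\\'] = (['\\'], []) := by
  rw [classSpanB.eq_def]
  split
  · simp_all
  · simp_all
  · simp_all
  · rename_i heq
    injection heq with h1 h2
    subst h1; subst h2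
    simp [classSpanB]

theorem S_cons (c : Char) (r : List Char) (h1 : c ≠ '\\') (h2 : c ≠ ']') :
    classSpanB (c :: r) = (c :: (classSpanB r).1, (classSpanB r).2) := by
  rw [classSpanB.eq_def]; split <;> simp_all

-- A run with in_class = False computes B's tokenizer; with in_class = True it computes
-- B's class-consumer followed by the tokenizer.
theorem stripA_eq_stripB :
    ∀ (n : Nat) (l : List Char), l.length ≤ n →
      stripA false l = stripB l ∧
      stripA true l = (classSpanB l).1 ++ stripB (classSpanB l).2 := by
  intro n
  induction n with
  | zero =>
    intro l hl
    cases l with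
    | nil => simp [A_nil, B_nil, S_nil]
    | cons c r => simp at hl
  | succ n ih =>
    intro l hl
    cases l with
    | nil => simp [A_nil, B_nil, S_nil]
    | cons c r =>
      simp only [List.length_cons] at hl
      have hr : r.length ≤ n := by omega
      by_cases hbs : c = '\\'
      · subst hbs
        cases r with
        | nil =>
          refine ⟨?_, ?_⟩
          · rw [A_bs_nil, B_bs_nil]
          · rw [A_bs_nil, S_bs_nil, B_nil]; rfl
        | cons d r' =>
          have hr' : r'.length ≤ n := by
            simp only [List.length_cons] at hr; omega
          obtain ⟨ihf, iht⟩ := ih r' hr'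
          refine ⟨?_, ?_⟩
          · rw [A_esc, B_esc, ihf]
          · rw [A_esc, S_esc, iht]; simp
      · obtain ⟨ihf, iht⟩ := ih r hr
        refine ⟨?_, ?_⟩
        · rw [A_cons false c r hbs]
          by_cases hbr : c = '['
          · subst hbr
            rw [B_class]
            simp [iht]
          · by_cases hws : c = ' ' ∨ c = '\t' ∨ c = '\r' ∨ c = '\n'
            · have hhash : c ≠ '#' := by
                rcases hws with h | h | h | h <;> subst h <;> decide
              rw [B_cons c r hbs hbr hhash]
              simp [hbr, hws, ihf]
            · by_cases hc : c = '#'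
              · subst hc
                rw [B_comment]
                have hd : (r.dropWhile (· ≠ '\n')).length ≤ n :=
                  le_trans (List.length_dropWhile_le _ _) hr
                obtain ⟨ihd, _⟩ := ih _ hd
                rw [if_neg hws, skipCommentA_eq_dropWhile]
                simp only [ne_eq, decide_not] at ihd ⊢
                exact ihd
              · rw [B_cons c r hbs hbr hc]
                simp [hbr, hws, hc, ihf]
        · rw [A_cons true c r hbs]
          by_cases hcl : c = ']'
          · subst hcl
            rw [S_close]
            simp [ihf]
          · rw [S_cons c r hbs hcl]
            simp [hcl, iht]

-- ===== VERDICT (by name: the statement is the Claim_ definition above) =====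
theorem strip_verbose_py_spec : Claim_equal_strip_verbose_py := by
  intro pattern _
  unfold Spec_strip_verbose_py strip_verbose_py strip_verbose_py_alt
  exact congrArg String.ofList
    ((stripA_eq_stripB pattern.toList.length pattern.toList le_rfl).1)
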